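-- pv_equiv track=rewrite | github.com/miris032/Bachelor_thesis-master | data/ticker_data/draw_mix_stock.py | only_retain_last_1
-- ===== SOURCE A (Python) =====
-- def only_retain_last_1(input_list):
--     result_list = []
--     current_sequence = 0
--
--     for element in input_list:
--         if element == 1:
--             current_sequence += 1
--         else:
--             current_sequence = 0
--
--         result_list.append(1 if current_sequence == 1 else 0)
--
--     return result_list
-- ===== SOURCE B (Python) =====
-- def only_retain_last_1(input_list):
--     # pass 1: run-length encode the list into (value, count) runs
--     runs = []
--     for x in input_list:
--         if runs and runs[-1][0] == x:
--             runs[-1] = (runs[-1][0], runs[-1][1] + 1)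
--         else:
--             runs.append((x, 1))
--     # pass 2: expand each run; a run of 1s becomes [1, 0, 0, ...], anything else all zeros
--     out = []
--     for v, c in runs:
--         out.extend([1] + [0] * (c - 1) if v == 1 else [0] * c)
--     return out
-- ===== Notes on version B (the rewrite author's own statement) =====
-- stated objective: alternative
-- what changed: Replaces A's single stateful pass with a run-counter by two staged passes over a different intermediate structure: first run-length encode the list into (value,count) runs, then expand each run (a run of 1s becomes [1,0,...,0], any other run becomes all zeros).
import Mathlib
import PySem

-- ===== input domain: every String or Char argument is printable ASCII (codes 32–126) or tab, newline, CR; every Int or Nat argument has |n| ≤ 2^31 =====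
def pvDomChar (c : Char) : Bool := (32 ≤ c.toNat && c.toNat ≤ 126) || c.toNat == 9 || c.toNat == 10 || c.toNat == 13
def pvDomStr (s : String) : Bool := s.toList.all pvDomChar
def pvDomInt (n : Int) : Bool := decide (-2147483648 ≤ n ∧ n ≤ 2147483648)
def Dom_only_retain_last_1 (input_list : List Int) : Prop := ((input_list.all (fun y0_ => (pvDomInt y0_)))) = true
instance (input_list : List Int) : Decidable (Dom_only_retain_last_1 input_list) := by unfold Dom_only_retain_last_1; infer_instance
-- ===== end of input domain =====

-- B replaces A's stateful run-counter pass by two staged passes: run-length encode,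
-- then expand each run; objective: alternative decomposition, same O(n) cost.


-- ===== PORT A =====
-- A's loop: running counter of consecutive 1s, emit 1 exactly when it just became 1.
def only_retain_last_1_go (current_sequence : Int) : List Int → List Int
  | [] => []
  | element :: rest =>
      let cs' := if element == 1 then current_sequence + 1 else 0
      (if cs' == 1 then (1 : Int) else 0) :: only_retain_last_1_go cs' rest

def only_retain_last_1 (input_list : List Int) : List Int :=
  only_retain_last_1_go 0 input_list

-- ===== PORT B =====
-- pass 1: run-length encode (append a new run, or bump the count of the last run)
def rleStep (runs : List (Int × Int)) (x : Int) : List (Int × Int) :=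
  match runs.getLast? with
  | some (v, c) => if v == x then runs.dropLast ++ [(v, c + 1)] else runs ++ [(x, 1)]
  | none => runs ++ [(x, 1)]

-- pass 2: [1] + [0] * (c - 1) if v == 1 else [0] * c
def expandRun (v : Int) (c : Int) : List Int :=
  if v == 1 then 1 :: List.replicate (c - 1).toNat 0 else List.replicate c.toNat 0

def only_retain_last_1_alt (input_list : List Int) : List Int :=
  (input_list.foldl rleStep []).foldl (fun out p => out ++ expandRun p.1 p.2) []

-- ===== PRECONDITION & SPEC =====
def Spec_only_retain_last_1 (input_list : List Int) (out : List Int) : Prop := out = only_retain_last_1_alt input_list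
instance (input_list : List Int) (out : List Int) : Decidable (Spec_only_retain_last_1 input_list out) := by unfold Spec_only_retain_last_1; infer_instance

-- ===== CLAIM (what is proved, stated in full; the proofs are below) =====
def Claim_equal_only_retain_last_1 : Prop := ∀ (input_list : List Int), Dom_only_retain_last_1 input_list → Spec_only_retain_last_1 input_list (only_retain_last_1 input_list)

-- ===== LEMMAS AND PROOFS =====

-- recursive characterisation of the fold-based run-length encoding
def rleGo (v c : Int) : List Int → List (Int × Int)
  | [] => [(v, c)]
  | x :: xs => if v == x then rleGo v (c + 1) xs else (v, c) :: rleGo x 1 xs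

lemma foldl_rleStep_concat (xs : List Int) :
    ∀ (rs : List (Int × Int)) (v c : Int),
      List.foldl rleStep (rs ++ [(v, c)]) xs = rs ++ rleGo v c xs := by
  induction xs with
  | nil => intro rs v c; simp [rleGo]
  | cons x xs ih =>
      intro rs v c
      simp only [List.foldl_cons, rleGo]
      have hstep : rleStep (rs ++ [(v, c)]) x =
          if v == x then rs ++ [(v, c + 1)] else (rs ++ [(v, c)]) ++ [(x, 1)] := by
        simp [rleStep]
      by_cases h : v = x
      · simp only [h, beq_self_eq_true, if_true] at hstep ⊢
        rw [hstep, ih]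
      · have hb : (v == x) = false := by simp [h]
        simp only [hb, Bool.false_eq_true, if_false] at hstep ⊢
        rw [hstep]
        simpa using ih (rs ++ [(v, c)]) x 1
  
lemma foldl_extend (rs : List (Int × Int)) :
    ∀ (acc : List Int),
      List.foldl (fun out p => out ++ expandRun p.1 p.2) acc rs
        = acc ++ rs.flatMap (fun p => expandRun p.1 p.2) := by
  induction rs with
  | nil => intro acc; simp
  | cons p rs ih => intro acc; simp [ih, List.flatMap_cons]

lemma rleGo_expand (xs : List Int) :
    ∀ (v c : Int), 1 ≤ c →
      (rleGo v c xs).flatMap (fun p => expandRun p.1 p.2)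
        = expandRun v c ++ only_retain_last_1_go (if v == 1 then c else 0) xs := by
  induction xs with
  | nil => intro v c _; simp [rleGo, only_retain_last_1_go]
  | cons x xs ih =>
      intro v c hc
      simp only [rleGo]
      by_cases h : v = x
      · subst h
        simp only [beq_self_eq_true, if_true]
        rw [ih v (c + 1) (by omega)]
        by_cases hv : v = 1
        · subst hv
          simp only [beq_self_eq_true, if_true, only_retain_last_1_go]
          have h1 : ((c + 1 : Int) == 1) = false := by
            simp only [beq_eq_false_iff_ne, ne_eq]; omega
          simp only [h1, Bool.false_eq_true, if_false]
          have : expandRun 1 (c + 1) = expandRun 1 c ++ [0] := by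
            simp only [expandRun, beq_self_eq_true, if_true]
            rw [show (c + 1 - 1).toNat = (c - 1).toNat + 1 from by omega,
              List.replicate_succ']
            simp
          rw [this]; simp
        · have hb : (v == 1) = false := by simp [hv]
          simp only [hb, Bool.false_eq_true, if_false, only_retain_last_1_go]
          have : expandRun v (c + 1) = expandRun v c ++ [0] := by
            simp only [expandRun, hb, Bool.false_eq_true, if_false]
            rw [show (c + 1).toNat = c.toNat + 1 from by omega, List.replicate_succ']
          rw [this]; simp
      · have hb : (v == x) = false := by simp [h]
        simp only [hb, Bool.false_eq_true, if_false, List.flatMap_cons]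
        rw [ih x 1 le_rfl]
        simp only [only_retain_last_1_go]
        by_cases hx : x = 1
        · subst hx
          have hv : (v == 1) = false := by simp [h]
          simp only [hv, Bool.false_eq_true, if_false, beq_self_eq_true, if_true]
          norm_num [expandRun]
        · have hxb : (x == 1) = false := by simp [hx]
          simp only [hxb, Bool.false_eq_true, if_false]
          by_cases hv : v = 1
          · subst hv
            simp [expandRun, hxb]
          · have hvb : (v == 1) = false := by simp [hv]
            simp [hvb, expandRun, hxb]

-- ===== VERDICT (by name: the statement is the Claim_ definition above) =====
theorem only_retain_last_1_spec : Claim_equal_only_retain_last_1 := by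
  intro l _
  unfold Spec_only_retain_last_1 only_retain_last_1 only_retain_last_1_alt
  cases l with
  | nil => rfl
  | cons x xs =>
      have h0 : List.foldl rleStep [] (x :: xs) = rleGo x 1 xs := by
        have := foldl_rleStep_concat xs [] x 1
        simpa [rleStep] using this
      rw [h0, foldl_extend, List.nil_append, rleGo_expand xs x 1 le_rfl]
      simp only [only_retain_last_1_go]
      by_cases hx : x = 1
      · subst hx; simp [expandRun]
      · have hxb : (x == 1) = false := by simp [hx]
        simp [expandRun, hxb]
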